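-- pv_equiv track=rewrite | github.com/tanmayagarwal1/Code | Algorithms/AmazonBuilder.py | FullfillmentBuilder
-- ===== SOURCE A (Python) =====
-- def FullfillmentBuilder(arr):
-- 	if not arr:
-- 		return 0
-- 	elif len(arr) == 1:
-- 		return arr[0]
-- 	dp, index, length = [0 for _ in range(len(arr))], 0, len(arr)
-- 	dp[0] = arr[0]
-- 	for _ in range(length):
-- 		if len(arr) > 1:
-- 			x = min(arr)
-- 			arr.remove(x)
-- 			y = min(arr)
-- 			arr.remove(y)
-- 			dp[index] = x + y
-- 			arr.append(x + y)
-- 			index += 1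
-- 	return sum(dp)
-- ===== SOURCE B (Python) =====
-- def FullfillmentBuilder(arr):
--     if not arr:
--         return 0
--     if len(arr) == 1:
--         return arr[0]
--     s = sorted(arr)
--     total = 0
--     while len(s) > 1:
--         c = s[0] + s[1]
--         del s[:2]
--         lo, hi = 0, len(s)
--         while lo < hi:
--             mid = (lo + hi) // 2
--             if s[mid] < c:
--                 lo = mid + 1
--             else:
--                 hi = mid
--         s.insert(lo, c)
--         total += c
--     return total
-- ===== Notes on version B (the rewrite author's own statement) =====
-- stated objective: faster
-- what changed: Instead of rescanning the whole list with min() and remove() at every merge, B sorts once and keeps the list sorted: each step takes the two front elements and re-inserts their sum at its binary-search position.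
import Mathlib
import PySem

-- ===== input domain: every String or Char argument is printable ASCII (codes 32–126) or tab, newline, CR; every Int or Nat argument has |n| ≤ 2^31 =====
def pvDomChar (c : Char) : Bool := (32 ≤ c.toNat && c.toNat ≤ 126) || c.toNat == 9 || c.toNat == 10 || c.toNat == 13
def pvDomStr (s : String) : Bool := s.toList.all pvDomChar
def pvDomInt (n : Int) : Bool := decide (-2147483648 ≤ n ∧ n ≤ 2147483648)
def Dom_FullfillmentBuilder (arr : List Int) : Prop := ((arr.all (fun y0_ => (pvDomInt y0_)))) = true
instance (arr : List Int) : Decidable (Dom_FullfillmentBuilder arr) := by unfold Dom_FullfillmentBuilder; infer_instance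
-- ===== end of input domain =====

-- B replaces A's per-merge min()/remove() rescans by one initial sort plus binary-search
-- re-insertion of each merged sum (objective: faster, constant-factor). Equivalence is about
-- the RETURN value only: the Python A empties the caller's list in place, B does not mutate it.

-- ===== PORT A =====
-- one iteration of A's for-loop body (the `match … | none => st` arms are totality guards
-- for cases the guard `1 < len` already excludes)
def pyStepA (st : List Int × List Int × Int) : List Int × List Int × Int :=
  if 1 < st.1.length then
    match PySem.List.min? st.1 (fun v => v) with
    | none => st
    | some x =>
      match PySem.List.remove? st.1 x with
      | none => st
      | some a1 =>
        match PySem.List.min? a1 (fun v => v) with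
        | none => st
        | some y =>
          match PySem.List.remove? a1 y with
          | none => st
          | some a2 =>
            (a2 ++ [x + y], PySem.List.pySetD st.2.1 st.2.2 (x + y), st.2.2 + 1)
  else st

def FullfillmentBuilder (arr : List Int) : Int :=
  if arr = [] then 0
  else if arr.length = 1 then PySem.List.pyGetD arr 0 0
  else
    let dp : List Int := (PySem.List.pyRange 0 (arr.length : Int) 1).map (fun _ => (0 : Int))
    let dp := PySem.List.pySetD dp 0 (PySem.List.pyGetD arr 0 0)
    let st := (PySem.List.pyRange 0 (arr.length : Int) 1).foldl
      (fun st _ => pyStepA st) (arr, dp, (0 : Int))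
    st.2.1.sum

-- ===== PORT B =====
-- the inner `while lo < hi` binary-search loop of Source B
def bsearchB (s : List Int) (c : Int) (lo hi : Int) : Int :=
  if h : lo < hi then
    let mid := PySem.Int.floordiv (lo + hi) 2
    if PySem.List.pyGetD s mid 0 < c then bsearchB s c (mid + 1) hi
    else bsearchB s c lo mid
  else lo
termination_by (hi - lo).toNat
decreasing_by
  · have := PySem.Int.floordiv_eq_ediv_of_pos (a := lo + hi) (b := 2) (by omega)
    simp only [this]; omega
  · have := PySem.Int.floordiv_eq_ediv_of_pos (a := lo + hi) (b := 2) (by omega)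
    simp only [this]; omega

-- the outer `while len(s) > 1` merge loop of Source B
def loopB (s : List Int) (total : Int) : Int :=
  if h : 1 < s.length then
    let c := PySem.List.pyGetD s 0 0 + PySem.List.pyGetD s 1 0
    let s2 := PySem.List.slice s (some 2) none
    let lo := bsearchB s2 c 0 (s2.length : Int)
    loopB (PySem.List.insert s2 lo c) (total + c)
  else total
termination_by s.length
decreasing_by
  have h2 : s2.length = s.length - 2 := by
    show (PySem.List.slice s (some 2) none).length = s.length - 2
    rw [PySem.List.slice_from s (a := 2) (by norm_num)]
    simp
  have h3 := PySem.List.length_insert s2 lo c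
  change (PySem.List.insert s2 lo c).length < s.length
  omega

def FullfillmentBuilder_alt (arr : List Int) : Int :=
  if arr = [] then 0
  else if arr.length = 1 then PySem.List.pyGetD arr 0 0
  else loopB (PySem.List.sorted arr (fun v => v) false) 0

-- ===== PRECONDITION & SPEC =====
def Spec_FullfillmentBuilder (arr : List Int) (out : Int) : Prop := out = FullfillmentBuilder_alt arr
instance (arr : List Int) (out : Int) : Decidable (Spec_FullfillmentBuilder arr out) := by unfold Spec_FullfillmentBuilder; infer_instance

-- ===== CLAIM (what is proved, stated in full; the proofs are below) =====
def Claim_equal_FullfillmentBuilder : Prop := ∀ (arr : List Int), Dom_FullfillmentBuilder arr → Spec_FullfillmentBuilder arr (FullfillmentBuilder arr)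

-- ===== LEMMAS AND PROOFS =====

-- sum of a point update
theorem sum_set_eq (l : List Int) : ∀ (n : Nat) (a : Int), n < l.length →
    (l.set n a).sum = l.sum - l.getD n 0 + a := by
  induction l with
  | nil => intro n a h; simp at h
  | cons x t ih =>
    intro n a h
    cases n with
    | zero => simp [List.set]; ring
    | succ n =>
      simp only [List.set, List.sum_cons, List.getD_cons_succ]
      rw [ih n a (by simpa using h)]
      ring

theorem getD_set_ne (l : List Int) (i j : Nat) (a : Int) (hij : i ≠ j) :
    (l.set i a).getD j 0 = l.getD j 0 := by
  rw [List.getD_eq_getElem?_getD, List.getD_eq_getElem?_getD, List.getElem?_set_ne hij]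

-- take of the takeWhile-length is takeWhile; drop of it is dropWhile
theorem take_takeWhile_len (l : List Int) (p : Int → Bool) :
    l.take (l.takeWhile p).length = l.takeWhile p :=
  (List.prefix_iff_eq_take.mp (List.takeWhile_prefix p)).symm

theorem drop_takeWhile_len (l : List Int) (p : Int → Bool) :
    l.drop (l.takeWhile p).length = l.dropWhile p := by
  apply List.append_cancel_left (as := l.takeWhile p)
  have h1 := List.take_append_drop (l.takeWhile p).length l
  rw [take_takeWhile_len] at h1
  rw [h1, List.takeWhile_append_dropWhile]

-- on a sorted list, index j holds an element < c iff j is inside the `< c` prefix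
theorem sorted_lt_iff (c : Int) : ∀ (s : List Int), s.Pairwise (· ≤ ·) →
    ∀ (j : Nat) (hj : j < s.length),
    (s[j] < c ↔ j < (s.takeWhile (fun b => decide (b < c))).length) := by
  intro s
  induction s with
  | nil => intro _ j hj; simp at hj
  | cons x t ih =>
    intro hp j hj
    have hx : ∀ y ∈ t, x ≤ y := (List.pairwise_cons.mp hp).1
    have ht : t.Pairwise (· ≤ ·) := (List.pairwise_cons.mp hp).2
    by_cases hxc : x < c
    · rw [List.takeWhile_cons_of_pos (by simpa using hxc)]
      cases j with
      | zero => simpa using hxc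
      | succ j =>
        have hj' : j < t.length := by simpa using hj
        simpa using ih ht j hj'
    · rw [List.takeWhile_cons_of_neg (by simpa using hxc)]
      cases j with
      | zero => simpa using hxc
      | succ j =>
        have hj' : j < t.length := by simpa using hj
        simp only [List.getElem_cons_succ, List.length_nil]
        constructor
        · intro hlt
          exact absurd (lt_of_le_of_lt (hx _ (List.getElem_mem hj')) hlt) hxc
        · omega

-- characterisation of Source B's binary-search loop on a sorted list
theorem bsearchB_spec (s : List Int) (c : Int) (hs : s.Pairwise (· ≤ ·)) :
    ∀ (n : Nat) (lo hi : Int), (hi - lo).toNat ≤ n → 0 ≤ lo →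
      lo ≤ ((s.takeWhile (fun b => decide (b < c))).length : Int) →
      ((s.takeWhile (fun b => decide (b < c))).length : Int) ≤ hi → hi ≤ (s.length : Int) →
      bsearchB s c lo hi = ((s.takeWhile (fun b => decide (b < c))).length : Int) := by
  intro n
  induction n with
  | zero =>
    intro lo hi hn h0 hlp hph hhl
    rw [bsearchB, dif_neg (by omega)]
    omega
  | succ n ih =>
    intro lo hi hn h0 hlp hph hhl
    by_cases hlh : lo < hi
    · rw [bsearchB, dif_pos hlh]
      have hmid := PySem.Int.floordiv_two_mid_bounds (le_of_lt hlh)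
      have hed := PySem.Int.floordiv_eq_ediv_of_pos (a := lo + hi) (b := 2) (by omega)
      have hm1 : lo ≤ PySem.Int.floordiv (lo + hi) 2 := hmid.1
      have hm2 : PySem.Int.floordiv (lo + hi) 2 < hi := by rw [hed]; omega
      set mid := PySem.Int.floordiv (lo + hi) 2 with hmdef
      have hmlen : mid < (s.length : Int) := by omega
      have hget : PySem.List.pyGetD s mid 0 = s[mid.toNat]'(by omega) :=
        PySem.List.pyGetD_eq_getElem s 0 (by omega) hmlen
      have hchar := sorted_lt_iff c s hs mid.toNat (by omega)
      by_cases hcmp : PySem.List.pyGetD s mid 0 < c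
      · rw [if_pos hcmp]
        have : mid.toNat < (s.takeWhile (fun b => decide (b < c))).length := by
          rw [← hchar]; rw [hget] at hcmp; exact hcmp
        exact ih (mid + 1) hi (by omega) (by omega) (by omega) hph hhl
      · rw [if_neg hcmp]
        have : ¬ mid.toNat < (s.takeWhile (fun b => decide (b < c))).length := by
          rw [← hchar]; rw [hget] at hcmp; exact hcmp
        exact ih lo mid (by omega) h0 hlp (by omega) (by omega)
    · rw [bsearchB, dif_neg hlh]
      omega

-- inserting at the binary-search position = Mathlib's orderedInsert
theorem insertB_eq (u : List Int) (c : Int) (hu : u.Pairwise (· ≤ ·)) :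
    PySem.List.insert u (bsearchB u c 0 (u.length : Int)) c
      = List.orderedInsert (· ≤ ·) c u := by
  have hplen : (u.takeWhile (fun b => decide (b < c))).length ≤ u.length :=
    (List.takeWhile_prefix _).length_le
  have hb := bsearchB_spec u c hu (u.length : Int).toNat 0 (u.length : Int)
      (by omega) (by omega) (by omega) (by exact_mod_cast hplen) le_rfl
  rw [hb, PySem.List.insert_natCast u _ c hplen]
  rw [List.orderedInsert_eq_take_drop]
  have hpred : (fun b : Int => decide ¬ c ≤ b) = fun b : Int => decide (b < c) := by
    funext b; simp
  rw [hpred, take_takeWhile_len, drop_takeWhile_len]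

-- accumulator form of the merge loop
theorem loopB_acc : ∀ (n : Nat) (s : List Int), s.length ≤ n →
    ∀ (total : Int), loopB s total = total + loopB s 0 := by
  intro n
  induction n with
  | zero =>
    intro s hs total
    rw [loopB, dif_neg (by omega), loopB, dif_neg (by omega)]
    ring
  | succ n ih =>
    intro s hs total
    by_cases h : 1 < s.length
    · rw [loopB, dif_pos h]
      conv_rhs => rw [loopB, dif_pos h]
      have hlen : (PySem.List.insert (PySem.List.slice s (some 2) none)
          (bsearchB (PySem.List.slice s (some 2) none)
            (PySem.List.pyGetD s 0 0 + PySem.List.pyGetD s 1 0) 0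
            ((PySem.List.slice s (some 2) none).length : Int))
          (PySem.List.pyGetD s 0 0 + PySem.List.pyGetD s 1 0)).length ≤ n := by
        rw [PySem.List.length_insert, PySem.List.slice_from s (a := 2) (by norm_num)]
        simp
        omega
      rw [ih _ hlen]
      conv_rhs => rw [ih _ hlen]
      ring
    · rw [loopB, dif_neg h, loopB, dif_neg h]
      ring

-- one unfolding of loopB on a sorted list of length ≥ 2
theorem loopB_cons (v w : Int) (u : List Int) (hu : u.Pairwise (· ≤ ·)) (total : Int) :
    loopB (v :: w :: u) total = loopB (List.orderedInsert (· ≤ ·) (v + w) u) (total + (v + w)) := by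
  rw [loopB, dif_pos (by simp)]
  have h0 : PySem.List.pyGetD (v :: w :: u) 0 0 = v := by simp [pysem]
  have h1 : PySem.List.pyGetD (v :: w :: u) 1 0 = w := by simp [pysem]
  have h2 : PySem.List.slice (v :: w :: u) (some 2) none = u := by
    rw [PySem.List.slice_from _ (a := 2) (by norm_num)]
    rfl
  simp only [h0, h1, h2]
  rw [insertB_eq u (v + w) hu]

-- A's loop body under the sorted-permutation invariant
theorem stepA_eq (a dp : List Int) (idx : Int) (v w : Int) (u : List Int)
    (hperm : a.Perm (v :: w :: u)) (hs : (v :: w :: u).Pairwise (· ≤ ·)) :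
    ∃ a2, pyStepA (a, dp, idx) = (a2 ++ [v + w], PySem.List.pySetD dp idx (v + w), idx + 1)
      ∧ a2.Perm u := by
  have hlen : a.length = u.length + 2 := by simpa using hperm.length_eq
  have hv : ∀ y ∈ (w :: u), v ≤ y := (List.pairwise_cons.mp hs).1
  have hw : ∀ y ∈ u, w ≤ y := (List.pairwise_cons.mp (List.pairwise_cons.mp hs).2).1
  -- x = min(a) is the value v
  obtain ⟨x, hx⟩ : ∃ x, PySem.List.min? a (fun y => y) = some x := by
    cases hmx : PySem.List.min? a (fun y => y) with
    | none =>
      have : a = [] := (PySem.List.min?_eq_none_iff a _).mp hmx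
      simp [this] at hlen
    | some x => exact ⟨x, rfl⟩
  have hxv : x = v := by
    have hmem : x ∈ v :: w :: u := hperm.mem_iff.mp (PySem.List.min?_mem hx)
    have hle : x ≤ v := PySem.List.min?_isMin hx v (hperm.mem_iff.mpr (by simp))
    rcases List.mem_cons.mp hmem with h | h
    · exact h
    · exact le_antisymm hle (hv x h)
  subst hxv
  have hxa : x ∈ a := PySem.List.min?_mem hx
  have hrem1 : PySem.List.remove? a x = some (a.erase x) :=
    PySem.List.remove?_eq_some_erase a x hxa
  have hperm1 : (a.erase x).Perm (w :: u) := by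
    have := hperm.erase x
    rwa [List.erase_cons_head] at this
  have hlen1 : (a.erase x).length = u.length + 1 := by simpa using hperm1.length_eq
  -- y = min of the rest is the value w
  obtain ⟨y, hy⟩ : ∃ y, PySem.List.min? (a.erase x) (fun z => z) = some y := by
    cases hmy : PySem.List.min? (a.erase x) (fun z => z) with
    | none =>
      have : a.erase x = [] := (PySem.List.min?_eq_none_iff _ _).mp hmy
      simp [this] at hlen1
    | some y => exact ⟨y, rfl⟩
  have hyw : y = w := by
    have hmem : y ∈ w :: u := hperm1.mem_iff.mp (PySem.List.min?_mem hy)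
    have hle : y ≤ w := PySem.List.min?_isMin hy w (hperm1.mem_iff.mpr (by simp))
    rcases List.mem_cons.mp hmem with h | h
    · exact h
    · exact le_antisymm hle (hw y h)
  subst hyw
  have hya : y ∈ a.erase x := PySem.List.min?_mem hy
  have hrem2 : PySem.List.remove? (a.erase x) y = some ((a.erase x).erase y) :=
    PySem.List.remove?_eq_some_erase _ y hya
  have hperm2 : ((a.erase x).erase y).Perm u := by
    have := hperm1.erase y
    rwa [List.erase_cons_head] at this
  refine ⟨(a.erase x).erase y, ?_, hperm2⟩
  unfold pyStepA
  rw [if_pos (by simpa [hlen] using Nat.lt_of_sub_eq_succ rfl)]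
  simp only [hx, hrem1, hy, hrem2]

-- the loop does nothing once one element is left
theorem foldA_noop (l : List Int) (a dp : List Int) (idx : Int) (h : a.length ≤ 1) :
    l.foldl (fun st _ => pyStepA st) (a, dp, idx) = (a, dp, idx) := by
  induction l with
  | nil => rfl
  | cons x t ih =>
    have hstep : pyStepA (a, dp, idx) = (a, dp, idx) := by
      unfold pyStepA
      rw [if_neg (by simpa using h)]
    simpa [hstep] using ih

theorem loopB_base (s : List Int) (h : s.length ≤ 1) : loopB s 0 = 0 := by
  rw [loopB, dif_neg (by omega)]

-- main invariant: the sum accumulated in dp tracks B's merge loop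
theorem foldA_sum (l : List Int) : ∀ (a s dp : List Int) (idx : Nat),
    a.Perm s → s.Pairwise (· ≤ ·) → a.length ≤ l.length + 1 →
    idx + a.length ≤ dp.length + 1 →
    (∀ j, idx ≤ j → dp.getD j 0 = 0) →
    (l.foldl (fun st _ => pyStepA st) (a, dp, (idx : Int))).2.1.sum = dp.sum + loopB s 0 := by
  induction l with
  | nil =>
    intro a s dp idx hperm hs hl hd hz
    have : s.length ≤ 1 := by have := hperm.length_eq; simp at hl; omega
    simp [loopB_base s this]
  | cons h0 t ih =>
    intro a s dp idx hperm hs hl hd hz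
    by_cases ha : 1 < a.length
    · have hslen : 1 < s.length := hperm.length_eq ▸ ha
      obtain ⟨v, w, u, rfl⟩ : ∃ v w u, s = v :: w :: u := by
        match s, hslen with
        | v :: w :: u, _ => exact ⟨v, w, u, rfl⟩
      obtain ⟨a2, hstep, hp2⟩ := stepA_eq a dp (idx : Int) v w u hperm hs
      have hu : u.Pairwise (· ≤ ·) := (List.pairwise_cons.mp (List.pairwise_cons.mp hs).2).2
      have hidx : idx < dp.length := by
        have := hperm.length_eq; simp at this; omega
      have hset : PySem.List.pySetD dp (idx : Int) (v + w) = dp.set idx (v + w) := by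
        rw [PySem.List.pySetD_of_nonneg dp _ (by omega)]
        simp
      have hcast : ((idx : Int) + 1) = ((idx + 1 : Nat) : Int) := by push_cast; ring
      have hfold : (h0 :: t).foldl (fun st _ => pyStepA st) (a, dp, (idx : Int))
          = t.foldl (fun st _ => pyStepA st) (a2 ++ [v + w], dp.set idx (v + w), ((idx + 1 : Nat) : Int)) := by
        simp only [List.foldl_cons, hstep, hset, hcast]
      rw [hfold]
      have halen : a.length = u.length + 2 := by simpa using hperm.length_eq
      have hperm' : (a2 ++ [v + w]).Perm (List.orderedInsert (· ≤ ·) (v + w) u) :=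
        ((List.perm_append_singleton _ _).trans (hp2.cons _)).trans
          (List.perm_orderedInsert _ _ _).symm
      have hs' : (List.orderedInsert (· ≤ ·) (v + w) u).Pairwise (· ≤ ·) :=
        List.Pairwise.orderedInsert _ _ hu
      have hl' : (a2 ++ [v + w]).length ≤ t.length + 1 := by
        have := hp2.length_eq; simp at hl ⊢; omega
      have hd' : (idx + 1) + (a2 ++ [v + w]).length ≤ (dp.set idx (v + w)).length + 1 := by
        have := hp2.length_eq; simp; omega
      have hz' : ∀ j, idx + 1 ≤ j → (dp.set idx (v + w)).getD j 0 = 0 := by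
        intro j hj
        rw [getD_set_ne dp idx j _ (by omega)]
        exact hz j (by omega)
      rw [ih _ _ _ _ hperm' hs' hl' hd' hz']
      have hsum : (dp.set idx (v + w)).sum = dp.sum + (v + w) := by
        rw [sum_set_eq dp idx _ hidx, hz idx le_rfl]; ring
      rw [hsum, loopB_cons v w u hu 0]
      conv_rhs => rw [loopB_acc (List.orderedInsert (· ≤ ·) (v + w) u).length _ le_rfl]
      ring
    · rw [foldA_noop]
      · have : s.length ≤ 1 := by have := hperm.length_eq; omega
        simp [loopB_base s this]
      · omega

-- out-of-range getD of the zero list is still 0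
theorem getD_replicate_zero (n j : Nat) : (List.replicate n (0 : Int)).getD j 0 = 0 := by
  by_cases h : j < n
  · exact List.getD_replicate 0 h
  · rw [List.getD_eq_default]; simpa using h

theorem FullfillmentBuilder_main : ∀ (arr : List Int),
    FullfillmentBuilder arr = FullfillmentBuilder_alt arr := by
  intro arr
  by_cases h0 : arr = []
  · simp [FullfillmentBuilder, FullfillmentBuilder_alt, h0]
  · by_cases h1 : arr.length = 1
    · simp [FullfillmentBuilder, FullfillmentBuilder_alt, h0, h1]
    · have hn : 2 ≤ arr.length := by
        have : arr.length ≠ 0 := by simpa [List.length_eq_zero_iff] using h0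
        omega
      set s := PySem.List.sorted arr (fun v => v) false with hsdef
      have hsp : arr.Perm s := (PySem.List.sorted_perm arr _ _).symm
      have hspw : s.Pairwise (· ≤ ·) := PySem.List.sorted_pairwise arr _
      have hslen : s.length = arr.length := hsp.length_eq.symm
      obtain ⟨v, w, u, hsvw⟩ : ∃ v w u, s = v :: w :: u := by
        match s, (by omega : 1 < s.length) with
        | v :: w :: u, _ => exact ⟨v, w, u, rfl⟩
      -- the initial dp list is n zeros with dp[0] := arr[0]
      have hdp0 : (PySem.List.pyRange 0 (arr.length : Int) 1).map (fun _ => (0 : Int))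
          = List.replicate arr.length 0 := by
        rw [List.map_const']
        congr 1
        simp [PySem.List.length_pyRange_one]
      -- unroll the first loop iteration
      have hrange : PySem.List.pyRange 0 (arr.length : Int) 1
          = 0 :: PySem.List.pyRange 1 (arr.length : Int) 1 :=
        PySem.List.pyRange_one_cons (by exact_mod_cast (by omega : 0 < arr.length))
      obtain ⟨a2, hstep, hp2⟩ := stepA_eq arr
        (PySem.List.pySetD (List.replicate arr.length 0) 0 (PySem.List.pyGetD arr 0 0))
        0 v w u (hsvw ▸ hsp) (hsvw ▸ hspw)
      have hu : u.Pairwise (· ≤ ·) := by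
        have := hsvw ▸ hspw
        exact (List.pairwise_cons.mp (List.pairwise_cons.mp this).2).2
      have hulen : u.length + 2 = arr.length := by
        have := hslen; rw [hsvw] at this; simpa using this
      -- the dp list after the first merge write: all zeros except slot 0 = v + w
      have hset1 : PySem.List.pySetD
          (PySem.List.pySetD (List.replicate arr.length 0) 0 (PySem.List.pyGetD arr 0 0))
          0 (v + w) = (List.replicate arr.length 0).set 0 (v + w) := by
        rw [PySem.List.pySetD_of_nonneg _ _ (by norm_num),
          PySem.List.pySetD_of_nonneg _ _ (by norm_num)]
        simp [List.set_set]
      have hdp2len : ((List.replicate arr.length 0).set 0 (v + w)).length = arr.length := by simp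
      have hdp2sum : ((List.replicate arr.length 0).set 0 (v + w)).sum = v + w := by
        rw [sum_set_eq _ 0 _ (by simpa using (by omega : 0 < arr.length)),
          getD_replicate_zero]
        simp
      have hdp2z : ∀ j, 1 ≤ j → ((List.replicate arr.length 0).set 0 (v + w)).getD j 0 = 0 := by
        intro j hj
        rw [getD_set_ne _ 0 j _ (by omega), getD_replicate_zero]
      -- apply the main invariant to the remaining iterations
      have hmain := foldA_sum (PySem.List.pyRange 1 (arr.length : Int) 1)
        (a2 ++ [v + w]) (List.orderedInsert (· ≤ ·) (v + w) u)
        ((List.replicate arr.length 0).set 0 (v + w)) 1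
        (((List.perm_append_singleton _ _).trans (hp2.cons _)).trans
          (List.perm_orderedInsert _ _ _).symm)
        (List.Pairwise.orderedInsert _ _ hu)
        (by
          have h1 : (PySem.List.pyRange 1 (arr.length : Int) 1).length = arr.length - 1 := by
            rw [PySem.List.length_pyRange_one]
            omega
          have := hp2.length_eq
          simp [h1, this]
          omega)
        (by
          have := hp2.length_eq
          simp [hdp2len, this]
          omega)
        hdp2z
      -- compute A
      rw [FullfillmentBuilder, if_neg h0, if_neg h1]
      show ((PySem.List.pyRange 0 (arr.length : Int) 1).foldl (fun st _ => pyStepA st)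
        (arr, PySem.List.pySetD ((PySem.List.pyRange 0 (arr.length : Int) 1).map (fun _ => (0:Int)))
          0 (PySem.List.pyGetD arr 0 0), (0 : Int))).2.1.sum = FullfillmentBuilder_alt arr
      rw [hdp0, hrange, List.foldl_cons, hstep, hset1]
      rw [show ((0 : Int) + 1) = ((1 : Nat) : Int) by norm_num] at *
      rw [hmain, hdp2sum]
      -- compute B
      rw [FullfillmentBuilder_alt, if_neg h0, if_neg h1, ← hsdef, hsvw,
        loopB_cons v w u hu 0]
      conv_rhs => rw [loopB_acc (List.orderedInsert (· ≤ ·) (v + w) u).length _ le_rfl]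
      ring

-- ===== VERDICT (by name: the statement is the Claim_ definition above) =====
theorem FullfillmentBuilder_spec : Claim_equal_FullfillmentBuilder := by
  intro arr _
  unfold Spec_FullfillmentBuilder
  exact FullfillmentBuilder_main arr
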